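-- pv_equiv track=rewrite | github.com/leacog/team3-Sail-RV32I-common | subsetting/pythonSubetting.py | findInstruction
-- ===== SOURCE A (Python) =====
-- instruction_list = []
--
-- def findInstruction(instruction, instruction_list):
--     if (int(instruction) == 0):
--         return "PADDING"
--
--     for bitmask in instruction_list:  #bitmask is confusing name: bitmask[0] contains name of instruction, e.g. "ADD", and bitmask[1] the bitmask "x01x0.."
--         mismatch = 0
--         for bitpair in list(zip(bitmask[1],instruction)):
--             if( (bitpair[0] != "x") and (bitpair[0] != bitpair[1]) ):
--                 mismatch = 1
--                 break
--
--         if (mismatch == 0):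
--             return bitmask[0]
--
--     return "NOP"  #Should never happen for a correct program binary
-- ===== SOURCE B (Python) =====
-- def findInstruction(instruction, instruction_list):
--     if int(instruction) == 0:
--         return "PADDING"
--
--     for name, pattern in instruction_list:
--         # encode the overlapping region as packed bytes: a fixed-mask, the
--         # required value, and the instruction's codes, then decide the whole
--         # pattern match with one bitwise test.
--         mask = val = code = 0
--         for p, c in zip(pattern, instruction):
--             mask = (mask << 8) | (0xFF if p != 'x' else 0)
--             val = (val << 8) | (ord(p) if p != 'x' else 0)
--             code = (code << 8) | ord(c)
--         if code & mask == val: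
--             return name
--
--     return "NOP"
-- ===== Notes on version B (the rewrite author's own statement) =====
-- stated objective: alternative
-- what changed: Instead of scanning zipped characters with a mismatch flag and break, B packs the overlapping region of each pattern into byte-encoded integers (a fixed-position mask, a required value, and the instruction's codes) and decides each pattern match with a single bitwise test (code & mask) == val.
import Mathlib
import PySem

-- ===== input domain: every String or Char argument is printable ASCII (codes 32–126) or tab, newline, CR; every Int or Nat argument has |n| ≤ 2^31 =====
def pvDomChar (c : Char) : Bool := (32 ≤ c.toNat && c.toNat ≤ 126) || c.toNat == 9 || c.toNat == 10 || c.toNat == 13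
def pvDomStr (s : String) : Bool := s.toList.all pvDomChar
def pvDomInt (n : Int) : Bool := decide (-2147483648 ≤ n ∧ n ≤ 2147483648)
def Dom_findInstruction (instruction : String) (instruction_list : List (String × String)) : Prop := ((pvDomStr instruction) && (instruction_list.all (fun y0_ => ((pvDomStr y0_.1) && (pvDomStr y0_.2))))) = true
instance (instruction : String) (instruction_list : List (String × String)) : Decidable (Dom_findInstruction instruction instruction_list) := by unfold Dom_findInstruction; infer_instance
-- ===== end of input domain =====

-- B packs each pattern's overlap with the instruction into byte-encoded integers
-- (fixed-mask, required value, instruction codes) and matches with one bitwise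
-- test (code & mask) == val, instead of A's per-character mismatch-flag loop
-- (objective: alternative).

-- ===== PORT A =====
-- inner loop: scan the zipped pairs, mismatch flag with break
def pvMismatchA : List (Char × Char) → Bool
  | [] => false
  | (m, c) :: rest => if m ≠ 'x' ∧ m ≠ c then true else pvMismatchA rest

def pvFindA (instruction : List Char) : List (String × String) → String
  | [] => "NOP"
  | (name, mask) :: rest =>
      if pvMismatchA (mask.toList.zip instruction) = false then name
      else pvFindA instruction rest

def findInstruction (instruction : String) (instruction_list : List (String × String)) : String :=
  match PySem.Int.ofStr? instruction with
  | none => ""   -- int(instruction) raises ValueError: excluded by Pre_findInstruction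
  | some n => if n = 0 then "PADDING" else pvFindA instruction.toList instruction_list

-- ===== PORT B =====
-- one zipped pair extends the three packed integers by one byte
def pvStepB (st : Nat × Nat × Nat) (pr : Char × Char) : Nat × Nat × Nat :=
  ((st.1 <<< 8) ||| (if pr.1 ≠ 'x' then 255 else 0),
   (st.2.1 <<< 8) ||| (if pr.1 ≠ 'x' then pr.1.toNat else 0),
   (st.2.2 <<< 8) ||| pr.2.toNat)

def pvFindB (instruction : List Char) : List (String × String) → String
  | [] => "NOP"
  | (name, pattern) :: rest =>
      let mvc := (pattern.toList.zip instruction).foldl pvStepB (0, 0, 0)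
      if mvc.2.2 &&& mvc.1 = mvc.2.1 then name
      else pvFindB instruction rest

def findInstruction_alt (instruction : String) (instruction_list : List (String × String)) : String :=
  match PySem.Int.ofStr? instruction with
  | none => ""   -- unreachable under Pre_findInstruction
  | some n => if n = 0 then "PADDING" else pvFindB instruction.toList instruction_list

-- ===== PRECONDITION & SPEC =====
-- A raises ValueError when int(instruction) fails to parse; exactly those inputs are excluded.
def Pre_findInstruction (instruction : String) (_instruction_list : List (String × String)) : Prop :=
  (PySem.Int.ofStr? instruction).isSome = true
instance (instruction : String) (instruction_list : List (String × String)) : Decidable (Pre_findInstruction instruction instruction_list) := by unfold Pre_findInstruction; infer_instance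
def pvWitness_findInstruction : String × (List (String × String)) := ("5", [("ADD", "x01")])

def Spec_findInstruction (instruction : String) (instruction_list : List (String × String)) (out : String) : Prop := out = findInstruction_alt instruction instruction_list
instance (instruction : String) (instruction_list : List (String × String)) (out : String) : Decidable (Spec_findInstruction instruction instruction_list out) := by unfold Spec_findInstruction; infer_instance

-- ===== CLAIM (what is proved, stated in full; the proofs are below) =====
def Claim_equal_findInstruction : Prop := ∀ (instruction : String) (instruction_list : List (String × String)), Dom_findInstruction instruction instruction_list → Pre_findInstruction instruction instruction_list → Spec_findInstruction instruction instruction_list (findInstruction instruction instruction_list)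

-- ===== LEMMAS AND PROOFS =====

-- closed-form byte encoders of a zipped pair list (big-endian, one byte each)
def pvEncM : List (Char × Char) → Nat
  | [] => 0
  | (p, _) :: t => 2 ^ (8 * t.length) * (if p ≠ 'x' then 255 else 0) + pvEncM t

def pvEncV : List (Char × Char) → Nat
  | [] => 0
  | (p, _) :: t => 2 ^ (8 * t.length) * (if p ≠ 'x' then p.toNat else 0) + pvEncV t

def pvEncC : List (Char × Char) → Nat
  | [] => 0
  | (_, c) :: t => 2 ^ (8 * t.length) * c.toNat + pvEncC t

-- generic bit-splitting of packed numbers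
theorem pv_lor_split (a b a' b' k : ℕ) (hb : b < 2^k) (hb' : b' < 2^k) :
    (2^k * a + b) ||| (2^k * a' + b') = 2^k * (a ||| a') + (b ||| b') := by
  have hab : b ||| b' < 2^k := Nat.or_lt_two_pow hb hb'
  apply Nat.eq_of_testBit_eq
  intro j
  rw [Nat.testBit_lor, Nat.testBit_two_pow_mul_add _ hb, Nat.testBit_two_pow_mul_add _ hb',
      Nat.testBit_two_pow_mul_add _ hab]
  split <;> simp

theorem pv_land_split (a b a' b' k : ℕ) (hb : b < 2^k) (hb' : b' < 2^k) :
    (2^k * a + b) &&& (2^k * a' + b') = 2^k * (a &&& a') + (b &&& b') := by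
  have hab : b &&& b' < 2^k := lt_of_le_of_lt Nat.and_le_left hb
  apply Nat.eq_of_testBit_eq
  intro j
  rw [Nat.testBit_land, Nat.testBit_two_pow_mul_add _ hb, Nat.testBit_two_pow_mul_add _ hb',
      Nat.testBit_two_pow_mul_add _ hab]
  split <;> simp

theorem pv_shift_or (m b : ℕ) (hb : b < 256) : (m <<< 8) ||| b = 256 * m + b := by
  have h := pv_lor_split m 0 0 b 8 (by norm_num) (by simpa using hb)
  simpa [Nat.shiftLeft_eq, Nat.mul_comm] using h

theorem pv_add_split (k X Y r s : ℕ) (hr : r < 2^k) (hs : s < 2^k) :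
    2^k * X + r = 2^k * Y + s ↔ X = Y ∧ r = s := by
  constructor
  · intro h
    have hrs : r = s := by
      have h1 := congrArg (· % 2^k) h
      simpa [Nat.mul_add_mod, Nat.mod_eq_of_lt hr, Nat.mod_eq_of_lt hs] using h1
    subst hrs
    exact ⟨by
      have := Nat.add_right_cancel h
      exact Nat.eq_of_mul_eq_mul_left (Nat.two_pow_pos k) this, rfl⟩
  · rintro ⟨rfl, rfl⟩; rfl

-- bounds of the encoders
theorem pvEncM_lt (ps : List (Char × Char)) : pvEncM ps < 2 ^ (8 * ps.length) := by
  induction ps with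
  | nil => simp [pvEncM]
  | cons p t ih =>
      obtain ⟨m, c⟩ := p
      have : (if m ≠ 'x' then 255 else 0) ≤ 255 := by split <;> norm_num
      simp only [pvEncM, List.length_cons, Nat.mul_add, Nat.mul_one, pow_add]
      have hb : (2:ℕ) ^ (8 * t.length) > 0 := Nat.two_pow_pos _
      nlinarith [ih]

theorem pvEncV_lt (ps : List (Char × Char)) (h : ∀ pr ∈ ps, pr.1.toNat < 256) :
    pvEncV ps < 2 ^ (8 * ps.length) := by
  induction ps with
  | nil => simp [pvEncV]
  | cons p t ih =>
      obtain ⟨m, c⟩ := p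
      have hm : m.toNat < 256 := h (m, c) List.mem_cons_self
      have hb : (if m ≠ 'x' then m.toNat else 0) ≤ 255 := by split <;> omega
      have ih' := ih (fun pr hpr => h pr (List.mem_cons_of_mem _ hpr))
      simp only [pvEncV, List.length_cons, Nat.mul_add, Nat.mul_one, pow_add]
      have hp : (2:ℕ) ^ (8 * t.length) > 0 := Nat.two_pow_pos _
      nlinarith [ih']

theorem pvEncC_lt (ps : List (Char × Char)) (h : ∀ pr ∈ ps, pr.2.toNat < 256) :
    pvEncC ps < 2 ^ (8 * ps.length) := by
  induction ps with
  | nil => simp [pvEncC]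
  | cons p t ih =>
      obtain ⟨m, c⟩ := p
      have hc : c.toNat < 256 := h (m, c) List.mem_cons_self
      have ih' := ih (fun pr hpr => h pr (List.mem_cons_of_mem _ hpr))
      simp only [pvEncC, List.length_cons, Nat.mul_add, Nat.mul_one, pow_add]
      have hp : (2:ℕ) ^ (8 * t.length) > 0 := Nat.two_pow_pos _
      nlinarith [ih']

-- the fold computes the packed encoders on top of shifted accumulators
theorem pv_fold_enc (ps : List (Char × Char))
    (hp : ∀ pr ∈ ps, pr.1.toNat < 256) (hc : ∀ pr ∈ ps, pr.2.toNat < 256) :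
    ∀ m v c : Nat, ps.foldl pvStepB (m, v, c) =
      (2 ^ (8 * ps.length) * m + pvEncM ps,
       2 ^ (8 * ps.length) * v + pvEncV ps,
       2 ^ (8 * ps.length) * c + pvEncC ps) := by
  induction ps with
  | nil => intro m v c; simp [pvEncM, pvEncV, pvEncC]
  | cons pr t ih =>
      intro m v c
      obtain ⟨p, ch⟩ := pr
      have hpb : p.toNat < 256 := hp (p, ch) List.mem_cons_self
      have hcb : ch.toNat < 256 := hc (p, ch) List.mem_cons_self
      have hmb : (if p ≠ 'x' then (255:ℕ) else 0) < 256 := by split <;> norm_num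
      have hvb : (if p ≠ 'x' then p.toNat else 0) < 256 := by split <;> omega
      have ih' := ih (fun q hq => hp q (List.mem_cons_of_mem _ hq))
                     (fun q hq => hc q (List.mem_cons_of_mem _ hq))
      simp only [List.foldl_cons]
      have hstep : pvStepB (m, v, c) (p, ch) =
          (256 * m + (if p ≠ 'x' then 255 else 0),
           256 * v + (if p ≠ 'x' then p.toNat else 0),
           256 * c + ch.toNat) := by
        simp only [pvStepB, pv_shift_or _ _ hmb, pv_shift_or _ _ hvb, pv_shift_or _ _ hcb]
      rw [hstep, ih']
      simp only [pvEncM, pvEncV, pvEncC, List.length_cons]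
      have hpow : (2:ℕ) ^ (8 * (t.length + 1)) = 2 ^ (8 * t.length) * 256 := by
        rw [show 8 * (t.length + 1) = 8 * t.length + 8 by ring, pow_add]; norm_num
      refine Prod.ext ?_ (Prod.ext ?_ ?_) <;>
        · simp only []
          rw [hpow]
          ring

-- the bitwise test on the encoders is exactly "no mismatch"
theorem pv_enc_iff (ps : List (Char × Char))
    (hp : ∀ pr ∈ ps, pr.1.toNat < 256) (hc : ∀ pr ∈ ps, pr.2.toNat < 256) :
    (pvEncC ps &&& pvEncM ps = pvEncV ps) ↔ pvMismatchA ps = false := by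
  induction ps with
  | nil => simp [pvEncC, pvEncM, pvEncV, pvMismatchA]
  | cons pr t ih =>
      obtain ⟨p, ch⟩ := pr
      have hpb : p.toNat < 256 := hp (p, ch) List.mem_cons_self
      have hcb : ch.toNat < 256 := hc (p, ch) List.mem_cons_self
      have hp' := fun q hq => hp q (List.mem_cons_of_mem (p, ch) hq)
      have hc' := fun q hq => hc q (List.mem_cons_of_mem (p, ch) hq)
      have hM := pvEncM_lt t
      have hV := pvEncV_lt t hp'
      have hC := pvEncC_lt t hc'
      have ih' := ih hp' hc'
      have hAnd : pvEncC t &&& pvEncM t < 2 ^ (8 * t.length) :=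
        lt_of_le_of_lt Nat.and_le_left hC
      simp only [pvEncC, pvEncM, pvEncV]
      rw [pv_land_split _ _ _ _ _ hC hM, pv_add_split _ _ _ _ _ hAnd hV]
      -- head byte
      have hhead : (ch.toNat &&& (if p ≠ 'x' then 255 else 0)) = (if p ≠ 'x' then p.toNat else 0) ↔
          ¬ (p ≠ 'x' ∧ p ≠ ch) := by
        by_cases hx : p = 'x'
        · simp [hx]
        · have h255 : ch.toNat &&& 255 = ch.toNat := by
            have := Nat.and_two_pow_sub_one_eq_mod ch.toNat 8
            norm_num at this
            rw [this]; omega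
          have hinj : ch.toNat = p.toNat ↔ p = ch := by
            constructor
            · intro h
              exact (Char.ext (UInt32.toNat.inj h)).symm
            · intro h; rw [h]
          simp [hx, h255, hinj]
      constructor
      · rintro ⟨hA, hB⟩
        simp only [pvMismatchA]
        rw [if_neg (hhead.mp hA)]
        exact ih'.mp hB
      · intro h
        simp only [pvMismatchA] at h
        by_cases hm : p ≠ 'x' ∧ p ≠ ch
        · rw [if_pos hm] at h; exact absurd h (by simp)
        · rw [if_neg hm] at h
          exact ⟨hhead.mpr hm, ih'.mpr h⟩

-- per-pattern-list equality of the two scans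
theorem pvFind_eq (inst : List Char) (hinst : ∀ c ∈ inst, c.toNat < 256) :
    ∀ l : List (String × String),
      (∀ pr ∈ l, ∀ ch ∈ pr.2.toList, ch.toNat < 256) →
      pvFindA inst l = pvFindB inst l := by
  intro l
  induction l with
  | nil => intro _; rfl
  | cons pr rest ih =>
      intro hl
      obtain ⟨name, pattern⟩ := pr
      have hp : ∀ q ∈ pattern.toList.zip inst, q.1.toNat < 256 := by
        intro q hq
        exact hl (name, pattern) List.mem_cons_self q.1 (List.of_mem_zip hq).1
      have hc : ∀ q ∈ pattern.toList.zip inst, q.2.toNat < 256 := by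
        intro q hq
        exact hinst q.2 (List.of_mem_zip hq).2
      have hfold := pv_fold_enc (pattern.toList.zip inst) hp hc 0 0 0
      have hkey : ((pattern.toList.zip inst).foldl pvStepB (0,0,0)).2.2 &&&
            ((pattern.toList.zip inst).foldl pvStepB (0,0,0)).1 =
            ((pattern.toList.zip inst).foldl pvStepB (0,0,0)).2.1 ↔
          pvMismatchA (pattern.toList.zip inst) = false := by
        rw [hfold]
        simpa using pv_enc_iff (pattern.toList.zip inst) hp hc
      simp only [pvFindA, pvFindB]
      split_ifs with h1 h2
      · rfl
      · exact absurd (hkey.mpr h1) h2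
      · exact absurd (hkey.mp ‹_›) h1
      · exact ih (fun q hq => hl q (List.mem_cons_of_mem _ hq))

-- ===== VERDICT (by name: the statement is the Claim_ definition above) =====
theorem findInstruction_spec : Claim_equal_findInstruction := by
  intro instruction instruction_list hdom _
  unfold Spec_findInstruction findInstruction findInstruction_alt
  simp only [Dom_findInstruction, Bool.and_eq_true, pvDomStr, List.all_eq_true] at hdom
  have hinst : ∀ c ∈ instruction.toList, c.toNat < 256 := by
    intro c hcmem
    have := hdom.1 c hcmem
    simp [pvDomChar] at this
    omega
  have hlist : ∀ pr ∈ instruction_list, ∀ ch ∈ pr.2.toList, ch.toNat < 256 := by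
    intro pr hpr ch hch
    have := (hdom.2 pr hpr)
    have := this.2 ch hch
    simp [pvDomChar] at this
    omega
  cases PySem.Int.ofStr? instruction with
  | none => rfl
  | some n =>
      by_cases h : n = 0
      · simp [h]
      · simp [h, pvFind_eq instruction.toList hinst instruction_list hlist]
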